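-- pv_equiv track=rewrite | github.com/A-EVO-Lab/a-evolve | agent_evolve/algorithms/training_evolve/prompts.py | _yaml_diff
-- ===== SOURCE A (Python) =====
-- def _yaml_diff(workspace_diff: str) -> str:
--     """Filter a git diff to *.yaml sections only."""
--     lines = workspace_diff.splitlines()
--     out: list[str] = []
--     include = False
--     for line in lines:
--         if line.startswith("diff --git"):
--             include = ".yaml" in line
--         if include:
--             out.append(line)
--     return "\n".join(out) if out else "(no yaml-level diff)"
-- ===== SOURCE B (Python) =====
-- def _yaml_diff(workspace_diff: str) -> str:
--     """Filter a git diff to *.yaml sections only."""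
--     sections: list[list[str]] = []
--     for line in workspace_diff.splitlines():
--         if line.startswith("diff --git"):
--             sections.append([line])
--         elif sections:
--             sections[-1].append(line)
--     flat = [l for sec in sections if ".yaml" in sec[0] for l in sec]
--     return "\n".join(flat) if flat else "(no yaml-level diff)"
-- ===== Notes on version B (the rewrite author's own statement) =====
-- stated objective: alternative
-- what changed: B first segments the diff into whole sections, one per git header line (dropping any preamble before the first header), then keeps the sections whose header names a yaml file and flattens them, instead of A's single pass carrying a per-line include flag.
import Mathlib
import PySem

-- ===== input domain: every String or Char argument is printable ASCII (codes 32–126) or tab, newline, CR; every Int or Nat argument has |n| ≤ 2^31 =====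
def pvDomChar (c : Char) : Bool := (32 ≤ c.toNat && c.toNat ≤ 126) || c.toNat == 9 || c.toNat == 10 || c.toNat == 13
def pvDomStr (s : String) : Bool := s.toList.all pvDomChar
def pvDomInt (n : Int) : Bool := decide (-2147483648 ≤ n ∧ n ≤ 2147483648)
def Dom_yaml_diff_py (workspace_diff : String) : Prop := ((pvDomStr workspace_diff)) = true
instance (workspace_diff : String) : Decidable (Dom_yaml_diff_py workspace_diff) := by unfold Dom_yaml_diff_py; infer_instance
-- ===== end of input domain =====

-- B segments the diff into whole sections (one per git header, dropping the preamble) and keeps whole sections whose header names a yaml file, instead of A's per-line include flag; alternative decomposition, same cost.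

-- ===== PORT A =====
def pvAStep (st : List String × Bool) (line : String) : List String × Bool :=
  let inc := if PySem.Str.startswith line "diff --git" then PySem.Str.isIn ".yaml" line else st.2
  (if inc then st.1 ++ [line] else st.1, inc)

def yaml_diff_py (workspace_diff : String) : String :=
  let out := ((PySem.Str.splitlines workspace_diff).foldl pvAStep ([], false)).1
  if out.isEmpty then "(no yaml-level diff)" else PySem.Str.join "\n" out

-- ===== PORT B =====
def pvBStep (secs : List (List String)) (line : String) : List (List String) :=
  if PySem.Str.startswith line "diff --git" then secs ++ [[line]]
  else
    match secs.getLast? with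
    | none => secs
    | some s => secs.dropLast ++ [s ++ [line]]

def yaml_diff_py_alt (workspace_diff : String) : String :=
  let secs := (PySem.Str.splitlines workspace_diff).foldl pvBStep []
  -- sec[0]: every section is built nonempty, so headD "" is exact here
  let flat := (secs.filter (fun sec => PySem.Str.isIn ".yaml" (sec.headD ""))).flatten
  if flat.isEmpty then "(no yaml-level diff)" else PySem.Str.join "\n" flat

-- ===== PRECONDITION & SPEC =====
def Spec_yaml_diff_py (workspace_diff : String) (out : String) : Prop := out = yaml_diff_py_alt workspace_diff
instance (workspace_diff : String) (out : String) : Decidable (Spec_yaml_diff_py workspace_diff out) := by unfold Spec_yaml_diff_py; infer_instance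

-- ===== CLAIM (what is proved, stated in full; the proofs are below) =====
def Claim_equal_yaml_diff_py : Prop := ∀ (workspace_diff : String), Dom_yaml_diff_py workspace_diff → Spec_yaml_diff_py workspace_diff (yaml_diff_py workspace_diff)

-- ===== LEMMAS AND PROOFS =====

-- Invariant tying A's (out, include) state to B's section list:
-- the yaml-filtered flattening of the sections is A's out, the include flag reflects
-- whether the current (last) section has a '.yaml' header, and all sections are nonempty.
def pvRel (st : List String × Bool) (secs : List (List String)) : Prop :=
  (secs.filter (fun sec => PySem.Str.isIn ".yaml" (sec.headD ""))).flatten = st.1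
  ∧ st.2 = (secs.getLast?.elim false (fun s => PySem.Str.isIn ".yaml" (s.headD "")))
  ∧ ∀ sec ∈ secs, sec ≠ []

theorem pvRel_step (st : List String × Bool) (secs : List (List String)) (line : String)
    (h : pvRel st secs) : pvRel (pvAStep st line) (pvBStep secs line) := by
  obtain ⟨hflat, hinc, hne⟩ := h
  unfold pvAStep pvBStep
  by_cases hhdr : PySem.Str.startswith line "diff --git"
  · simp only [hhdr, if_true]
    refine ⟨?_, ?_, ?_⟩
    · simp only [List.filter_append, List.flatten_append, ← hflat,
        List.filter_cons, List.filter_nil, List.headD_cons]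
      split_ifs <;> simp
    · simp
    · intro sec hsec
      rcases List.mem_append.1 hsec with h1 | h1
      · exact hne sec h1
      · simp at h1; simp [h1]
  · simp only [hhdr, Bool.false_eq_true, if_false]
    rcases List.eq_nil_or_concat secs with rfl | ⟨init, last, rfl⟩
    · simp at hinc
      exact ⟨by simpa [hinc] using hflat, by simp [hinc], hne⟩
    · have hlast : last ≠ [] := hne last (by simp)
      obtain ⟨a, t, rfl⟩ := List.exists_cons_of_ne_nil hlast
      simp only [List.concat_eq_append] at hflat hinc hne ⊢
      rw [List.getLast?_concat, List.dropLast_concat]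
      have hincv : st.2 = PySem.Str.isIn ".yaml" a := by
        rw [List.getLast?_concat] at hinc
        simpa using hinc
      refine ⟨?_, ?_, ?_⟩
      · simp only [List.filter_append, List.flatten_append, List.cons_append,
          List.headD_cons, List.filter_cons, List.filter_nil] at hflat ⊢
        rw [← hflat, hincv]
        split_ifs <;> simp
      · simp [hincv]
      · intro sec hsec
        rcases List.mem_append.1 hsec with h1 | h1
        · exact hne sec (List.mem_append.2 (Or.inl h1))
        · simp at h1; simp [h1]

theorem pvRel_foldl (lines : List String) (st : List String × Bool) (secs : List (List String))
    (h : pvRel st secs) : pvRel (lines.foldl pvAStep st) (lines.foldl pvBStep secs) := by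
  induction lines generalizing st secs with
  | nil => exact h
  | cons l ls ih => exact ih _ _ (pvRel_step st secs l h)

-- ===== VERDICT (by name: the statement is the Claim_ definition above) =====
theorem yaml_diff_py_spec : Claim_equal_yaml_diff_py := by
  intro ws _
  unfold Spec_yaml_diff_py yaml_diff_py yaml_diff_py_alt
  have h := pvRel_foldl (PySem.Str.splitlines ws) ([], false) []
    ⟨rfl, rfl, by intro sec hsec; simp at hsec⟩
  obtain ⟨hflat, -, -⟩ := h
  simp only [hflat]
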